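-- pv_equiv track=rewrite | github.com/Lio9/pokemon-factory | scripts/import_to_sqlite.py | get_localized_name
-- ===== SOURCE A (Python) =====
-- LANGUAGE_MAP = {
--     1: 'ja',     # 日文
--     4: 'zh-hant', # 繁体中文
--     5: 'fr',     # 法文
--     6: 'de',     # 德文
--     7: 'es',     # 西班牙文
--     8: 'it',     # 意大利文
--     9: 'en',     # 英文
--     11: 'ja',    # 日文
--     12: 'zh-hans', # 简体中文
-- }
--
-- def get_localized_name(names_data, preferred_langs=['zh-hans', 'zh-hant', 'en', 'ja']):
--     """获取本地化名称"""
--     if not names_data: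
--         return None
--
--     name_dict = {}
--     for item in names_data:
--         lang_id = int(item.get('local_language_id', 0))
--         if lang_id in LANGUAGE_MAP:
--             lang = LANGUAGE_MAP[lang_id]
--             name_dict[lang] = item.get('name')
--
--     for lang in preferred_langs:
--         if lang in name_dict:
--             return name_dict[lang]
--
--     return names_data[0].get('name')
-- ===== SOURCE B (Python) =====
-- LANGUAGE_MAP = {
--     1: 'ja',
--     4: 'zh-hant',
--     5: 'fr',
--     6: 'de',
--     7: 'es',
--     8: 'it',
--     9: 'en',
--     11: 'ja',
--     12: 'zh-hans',
-- }
--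
-- def get_localized_name(names_data, preferred_langs=['zh-hans', 'zh-hant', 'en', 'ja']):
--     """获取本地化名称"""
--     if not names_data:
--         return None
--     rank = {}
--     for i, lang in enumerate(preferred_langs):
--         rank.setdefault(lang, i)
--     best = None  # (rank, name) of the best match so far; ties go to the later item
--     for item in names_data:
--         r = rank.get(LANGUAGE_MAP.get(int(item.get('local_language_id', 0))))
--         if r is not None and (best is None or r <= best[0]):
--             best = (r, item.get('name'))
--     if best is not None:
--         return best[1]
--     return names_data[0].get('name')
-- ===== Notes on version B (the rewrite author's own statement) =====
-- stated objective: alternative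
-- what changed: B replaces A's build-a-lang-to-name-dict-then-probe-preferred-langs strategy by a rank index over preferred_langs (first-occurrence index via setdefault) and a single argmin scan of names_data keeping the lowest-ranked match with ties going to the later item, falling back to the first entry's name.
import Mathlib
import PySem

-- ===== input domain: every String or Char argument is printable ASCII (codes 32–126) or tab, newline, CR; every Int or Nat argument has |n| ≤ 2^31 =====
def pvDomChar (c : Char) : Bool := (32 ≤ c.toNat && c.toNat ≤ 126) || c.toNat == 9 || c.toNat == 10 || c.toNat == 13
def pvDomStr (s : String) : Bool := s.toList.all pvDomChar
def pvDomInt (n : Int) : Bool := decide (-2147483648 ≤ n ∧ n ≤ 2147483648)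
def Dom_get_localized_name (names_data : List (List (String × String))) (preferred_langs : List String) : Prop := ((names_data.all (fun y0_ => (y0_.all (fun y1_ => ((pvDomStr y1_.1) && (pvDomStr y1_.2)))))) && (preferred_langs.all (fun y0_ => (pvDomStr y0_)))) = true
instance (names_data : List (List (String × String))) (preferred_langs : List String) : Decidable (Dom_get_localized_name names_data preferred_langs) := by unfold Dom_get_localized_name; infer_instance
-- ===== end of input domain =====

-- B replaces A's lang->name dict + probe by a rank index over preferred_langs and a single
-- argmin scan of names_data (lowest rank wins, ties to the later item); objective: alternative.

-- ===== PORT A =====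
-- shared module constant LANGUAGE_MAP
def LANGUAGE_MAP : PySem.Dict Int String :=
  PySem.Dict.mk [(1, "ja"), (4, "zh-hant"), (5, "fr"), (6, "de"), (7, "es"),
                 (8, "it"), (9, "en"), (11, "ja"), (12, "zh-hans")]

-- int(item.get('local_language_id', 0)); a missing key gives int(0) = 0; a present value that
-- int() rejects is a ValueError (excluded by Pre_), .getD 0 is arbitrary there
def pvLangId (item : List (String × String)) : Int :=
  match (PySem.Dict.mk item).get? "local_language_id" with
  | none => 0
  | some s => (PySem.Int.ofStr? s).getD 0

-- the 'for item in names_data' loop building name_dict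
def pvBuildDict (names : List (List (String × String)))
    (d : PySem.Dict String (Option String)) : PySem.Dict String (Option String) :=
  match names with
  | [] => d
  | item :: rest =>
    match LANGUAGE_MAP.get? (pvLangId item) with
    | some lang => pvBuildDict rest (d.insert lang ((PySem.Dict.mk item).get? "name"))
    | none => pvBuildDict rest d

-- the 'for lang in preferred_langs' probe loop
def pvProbe (d : PySem.Dict String (Option String)) (langs : List String) : Option (Option String) :=
  match langs with
  | [] => none
  | lang :: rest =>
    match d.get? lang with
    | some v => some v
    | none => pvProbe d rest

def get_localized_name (names_data : List (List (String × String))) (preferred_langs : List String) : Option String :=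
  match names_data with
  | [] => none
  | first :: _ =>
    match pvProbe (pvBuildDict names_data PySem.Dict.empty) preferred_langs with
    | some v => v
    | none => (PySem.Dict.mk first).get? "name"

-- ===== PORT B =====
-- 'for i, lang in enumerate(preferred_langs): rank.setdefault(lang, i)'
def pvRankAux (d : PySem.Dict String Int) (i : Int) : List String → PySem.Dict String Int
  | [] => d
  | lang :: rest => pvRankAux (d.setdefault lang i) (i + 1) rest

-- rank.get(LANGUAGE_MAP.get(int(item.get('local_language_id', 0)))); rank never holds a
-- None key (all its keys come from preferred_langs), so a None lang looks up to None
def pvRankOf (rank : PySem.Dict String Int) (item : List (String × String)) : Option Int :=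
  match LANGUAGE_MAP.get? (pvLangId item) with
  | none => none
  | some lang => rank.get? lang

-- 'if r is not None and (best is None or r <= best[0]): best = (r, item.get('name'))'
def pvStep (rank : PySem.Dict String Int) (best : Option (Int × Option String))
    (item : List (String × String)) : Option (Int × Option String) :=
  match pvRankOf rank item with
  | none => best
  | some r =>
    match best with
    | none => some (r, (PySem.Dict.mk item).get? "name")
    | some (br, _) => if r ≤ br then some (r, (PySem.Dict.mk item).get? "name") else best

-- the 'for item in names_data' argmin loop
def pvBest (rank : PySem.Dict String Int)
    (names : List (List (String × String))) : Option (Int × Option String) :=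
  names.foldl (pvStep rank) none

def get_localized_name_alt (names_data : List (List (String × String))) (preferred_langs : List String) : Option String :=
  match names_data with
  | [] => none
  | first :: _ =>
    match pvBest (pvRankAux PySem.Dict.empty 0 preferred_langs) names_data with
    | some (_, nm) => nm
    | none => (PySem.Dict.mk first).get? "name"

-- ===== PRECONDITION & SPEC =====
-- Pre_ excludes exactly the inputs where A raises ValueError: an entry whose
-- 'local_language_id' value is a string int() rejects (B raises there too).
def Pre_get_localized_name (names_data : List (List (String × String))) (preferred_langs : List String) : Prop :=
  (names_data.all (fun item =>
    match (PySem.Dict.mk item).get? "local_language_id" with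
    | none => true
    | some s => (PySem.Int.ofStr? s).isSome)) = true

instance (names_data : List (List (String × String))) (preferred_langs : List String) : Decidable (Pre_get_localized_name names_data preferred_langs) := by unfold Pre_get_localized_name; infer_instance

def pvWitness_get_localized_name : (List (List (String × String))) × List String :=
  ([[("local_language_id", "9"), ("name", "Pikachu")],
    [("local_language_id", "12"), ("name", "Pika")]], ["zh-hans", "en"])

def Spec_get_localized_name (names_data : List (List (String × String))) (preferred_langs : List String) (out : Option String) : Prop := out = get_localized_name_alt names_data preferred_langs
instance (names_data : List (List (String × String))) (preferred_langs : List String) (out : Option String) : Decidable (Spec_get_localized_name names_data preferred_langs out) := by unfold Spec_get_localized_name; infer_instance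

-- ===== CLAIM (what is proved, stated in full; the proofs are below) =====
def Claim_equal_get_localized_name : Prop := ∀ (names_data : List (List (String × String))) (preferred_langs : List String), Dom_get_localized_name names_data preferred_langs → Pre_get_localized_name names_data preferred_langs → Spec_get_localized_name names_data preferred_langs (get_localized_name names_data preferred_langs)

-- ===== LEMMAS AND PROOFS =====

-- proof-side intermediate: the last entry of names matching lang, and the 'first lang that
-- has a match' scan; A's dict-then-probe is proved equal to it, then B's argmin as well
def pvLastMatch (names : List (List (String × String))) (lang : String) :
    Option (List (String × String)) :=
  names.reverse.find? (fun item => LANGUAGE_MAP.get? (pvLangId item) == some lang)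

def pvScan (names : List (List (String × String))) (langs : List String) : Option (Option String) :=
  match langs with
  | [] => none
  | lang :: rest =>
    match pvLastMatch names lang with
    | some item => some ((PySem.Dict.mk item).get? "name")
    | none => pvScan names rest

-- the dict built by A answers a lookup with the LAST matching entry's name
theorem pvBuild_get (names : List (List (String × String))) (lang : String)
    (d : PySem.Dict String (Option String)) :
    (pvBuildDict names d).get? lang =
      match pvLastMatch names lang with
      | some item => some ((PySem.Dict.mk item).get? "name")
      | none => d.get? lang := by
  induction names generalizing d with
  | nil => simp [pvBuildDict, pvLastMatch]
  | cons x xs ih =>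
    have hlm : pvLastMatch (x :: xs) lang =
        ((pvLastMatch xs lang).or
          (if LANGUAGE_MAP.get? (pvLangId x) == some lang then some x else none)) := by
      simp [pvLastMatch, List.find?_append]
    rcases hmap : LANGUAGE_MAP.get? (pvLangId x) with _ | lang'
    · rw [show pvBuildDict (x :: xs) d = pvBuildDict xs d by simp [pvBuildDict, hmap], ih]
      rw [hlm]
      simp [hmap]
    · rw [show pvBuildDict (x :: xs) d =
          pvBuildDict xs (d.insert lang' ((PySem.Dict.mk x).get? "name")) by
            simp [pvBuildDict, hmap], ih]
      rw [hlm]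
      by_cases hl : lang' = lang
      · subst hl
        simp only [hmap, BEq.rfl, if_true]
        cases pvLastMatch xs lang' <;> simp [PySem.Dict.get?_insert_self]
      · have : (LANGUAGE_MAP.get? (pvLangId x) == some lang) = false := by
          simp [hmap, hl]
        simp [this]
        cases pvLastMatch xs lang <;>
          simp [PySem.Dict.get?_insert_of_ne _ _ (fun h => hl h.symm)]

theorem pvProbe_eq_scan (names : List (List (String × String))) (langs : List String) :
    pvProbe (pvBuildDict names PySem.Dict.empty) langs = pvScan names langs := by
  induction langs with
  | nil => rfl
  | cons lang rest ih =>
    simp only [pvProbe, pvScan, pvBuild_get]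
    cases pvLastMatch names lang <;> simp [ih, PySem.Dict.get?_empty]

-- appending one lang at the end of the scan list
theorem pvScan_append (names : List (List (String × String))) (ls : List String) (lang : String) :
    pvScan names (ls ++ [lang]) =
      match pvScan names ls with
      | some v => some v
      | none => (pvLastMatch names lang).map (fun it => (PySem.Dict.mk it).get? "name") := by
  induction ls with
  | nil => simp [pvScan]; cases pvLastMatch names lang <;> simp
  | cons l rest ih =>
    simp only [List.cons_append, pvScan, ih]
    cases pvLastMatch names l <;> simp

theorem pvScan_none (names : List (List (String × String))) (ls : List String)
    (h : pvScan names ls = none) : ∀ lang ∈ ls, pvLastMatch names lang = none := by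
  induction ls with
  | nil => simp
  | cons l rest ih =>
    intro lang hmem
    simp only [pvScan] at h
    rcases hlm : pvLastMatch names l with _ | it
    · rw [hlm] at h
      rcases List.mem_cons.mp hmem with h1 | h1
      · subst h1; exact hlm
      · exact ih h lang h1
    · rw [hlm] at h; exact absurd h (by simp)

-- rankAux, peeled from the right
theorem pvRankAux_append (d : PySem.Dict String Int) (i : Int) (ls : List String) (lang : String) :
    pvRankAux d i (ls ++ [lang]) = (pvRankAux d i ls).setdefault lang (i + ls.length) := by
  induction ls generalizing d i with
  | nil => simp [pvRankAux]
  | cons l rest ih =>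
    simp only [List.cons_append, pvRankAux, ih]
    congr 1
    simp only [List.length_cons]
    push_cast
    ring

-- every rank stored by pvRankAux d i ls is < i + |ls| (given the same bound on d at i)
theorem pvRankAux_val_lt (ls : List String) (d : PySem.Dict String Int) (i : Int)
    (hd : ∀ l v, d.get? l = some v → v < i) :
    ∀ l v, (pvRankAux d i ls).get? l = some v → v < i + ls.length := by
  induction ls generalizing d i with
  | nil => intro l v h; have := hd l v h; simpa using this.trans_le (by simp)
  | cons x rest ih =>
    intro l v h
    have hstep : ∀ l' v', (d.setdefault x i).get? l' = some v' → v' < i + 1 := by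
      intro l' v' h'
      by_cases hx : l' = x
      · subst hx
        rw [PySem.Dict.get?_setdefault_self] at h'
        rcases hdx : d.get? l' with _ | w
        · rw [hdx] at h'; simp at h'; omega
        · rw [hdx] at h'; simp at h'; have := hd l' w hdx; omega
      · rw [PySem.Dict.get?_setdefault_of_ne _ _ hx] at h'
        have := hd l' v' h'; omega
    have := ih (d.setdefault x i) (i + 1) hstep l v h
    simp at this ⊢
    omega

theorem pvRankAux_contains (ls : List String) (d : PySem.Dict String Int) (i : Int) (l : String) :
    (pvRankAux d i ls).contains l = (d.contains l || decide (l ∈ ls)) := by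
  induction ls generalizing d i with
  | nil => simp [pvRankAux]
  | cons x rest ih =>
    simp only [pvRankAux, ih, PySem.Dict.contains_setdefault]
    by_cases hx : l = x <;> simp [hx, Bool.or_assoc]

-- ranks reachable from the fold are ranks stored in the dict
theorem pvBestFold_val (rank : PySem.Dict String Int) (names : List (List (String × String)))
    (b : Option (Int × Option String)) (v : Int) (nm : Option String)
    (hb : ∀ w m, b = some (w, m) → ∃ l, rank.get? l = some w)
    (h : names.foldl (pvStep rank) b = some (v, nm)) : ∃ l, rank.get? l = some v := by
  induction names generalizing b with
  | nil => exact hb v nm h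
  | cons x xs ih =>
    refine ih (pvStep rank b x) ?_ h
    intro w m hw
    unfold pvStep at hw
    rcases hr : pvRankOf rank x with _ | r
    · rw [hr] at hw; exact hb w m hw
    · rw [hr] at hw
      have hrl : ∃ l, rank.get? l = some r := by
        unfold pvRankOf at hr
        rcases hml : LANGUAGE_MAP.get? (pvLangId x) with _ | lg
        · rw [hml] at hr; cases hr
        · rw [hml] at hr; exact ⟨lg, hr⟩
      rcases b with _ | ⟨br, bn⟩
      · simp at hw; exact hw.1 ▸ hrl
      · simp only at hw
        split at hw
        · simp at hw; exact hw.1 ▸ hrl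
        · exact hb w m hw

-- CORE: extending the rank dict by a fresh lang with a strictly larger index only matters
-- when the old ranks produce no match, and then the last lang-matching item wins
theorem pvBest_insert (rank : PySem.Dict String Int) (lang : String) (i : Int)
    (hvals : ∀ l v, rank.get? l = some v → v < i)
    (hnc : rank.contains lang = false)
    (names : List (List (String × String))) :
    pvBest (rank.insert lang i) names =
      match pvBest rank names with
      | some b => some b
      | none => (pvLastMatch names lang).map (fun it => (i, (PySem.Dict.mk it).get? "name")) := by
  induction names using List.reverseRecOn with
  | nil => simp [pvBest, pvLastMatch]
  | append_singleton xs x ih =>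
    have hlm : pvLastMatch (xs ++ [x]) lang =
        (if LANGUAGE_MAP.get? (pvLangId x) == some lang then some x
         else pvLastMatch xs lang) := by
      simp only [pvLastMatch, List.reverse_append, List.reverse_singleton, List.singleton_append,
        List.find?]
      split <;> rename_i h
      · simp_all
      · simp_all
    have hfold : ∀ (r : PySem.Dict String Int),
        pvBest r (xs ++ [x]) = pvStep r (pvBest r xs) x := by
      intro r; simp [pvBest, List.foldl_append]
    have hnone : rank.get? lang = none := by
      rcases h : rank.get? lang with _ | v
      · rfl
      · exfalso
        have := PySem.Dict.contains_eq_isSome_get? rank lang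
        rw [h] at this; simp [hnc] at this
    rw [hfold, hfold, ih, hlm]
    rcases hml : LANGUAGE_MAP.get? (pvLangId x) with _ | lg
    · -- x has no mapped language: both steps are the identity
      have hro : ∀ r : PySem.Dict String Int, pvRankOf r x = none := by
        intro r; unfold pvRankOf; rw [hml]
      simp only [pvStep, hro]
      rw [if_neg (by simp)]
    · by_cases hlg : lg = lang
      · -- x matches the NEW lang
        subst hlg
        have hro : pvRankOf rank x = none := by simp [pvRankOf, hml, hnone]
        have hro' : pvRankOf (rank.insert lg i) x = some i := by
          simp [pvRankOf, hml, PySem.Dict.get?_insert_self]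
        rw [if_pos (by simp)]
        rcases hB : pvBest rank xs with _ | ⟨br, bn⟩
        · simp only [pvStep, hro, hro']
          cases pvLastMatch xs lg <;> simp
        · have hbr : br < i := by
            rcases pvBestFold_val rank xs none br bn (by intro w m h; cases h) hB with ⟨l, hl⟩
            exact hvals l br hl
          simp only [pvStep, hro, hro']
          rw [if_neg (by omega)]
      · -- x matches some OLD lang (or an unranked one): both steps agree
        have hro : pvRankOf (rank.insert lang i) x = pvRankOf rank x := by
          simp [pvRankOf, hml, PySem.Dict.get?_insert_of_ne _ _ hlg]
        rw [if_neg (by simp [hlg])]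
        rcases hr : pvRankOf rank x with _ | r
        · simp only [pvStep, hro, hr]
        · have hri : r < i := by
            rcases hml' : LANGUAGE_MAP.get? (pvLangId x) with _ | lg'
            · unfold pvRankOf at hr; rw [hml'] at hr; cases hr
            · unfold pvRankOf at hr; rw [hml'] at hr; exact hvals _ _ hr
          rcases hB : pvBest rank xs with _ | ⟨br, bn⟩
          · simp only [pvStep, hro, hr]
            cases hL : pvLastMatch xs lang <;> simp [if_pos (le_of_lt hri)]
          · simp only [pvStep, hro, hr]
            split <;> simp

-- B's argmin over names equals the probe order over preferred_langs
theorem pvBest_eq_scan (names : List (List (String × String))) (langs : List String) :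
    (pvBest (pvRankAux PySem.Dict.empty 0 langs) names).map (fun b => b.2) =
      pvScan names langs := by
  induction langs using List.reverseRecOn with
  | nil =>
    have : pvBest (pvRankAux PySem.Dict.empty 0 []) names = none := by
      have : ∀ b, (∀ w m, b = some (w, m) → False) →
          names.foldl (pvStep (pvRankAux PySem.Dict.empty 0 [])) b = b := by
        intro b hb
        induction names with
        | nil => rfl
        | cons x xs ih =>
          have hro : pvRankOf (pvRankAux PySem.Dict.empty 0 []) x = none := by
            unfold pvRankOf
            rcases LANGUAGE_MAP.get? (pvLangId x) with _ | lg
            · rfl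
            · simp [pvRankAux, PySem.Dict.get?_empty]
          simp only [List.foldl, pvStep, hro]
          exact ih
      simpa [pvBest] using this none (by intro w m h; cases h)
    simp [this, pvScan]
  | append_singleton ls lang ih =>
    rw [pvRankAux_append, pvScan_append]
    by_cases hc : (pvRankAux PySem.Dict.empty 0 ls).contains lang
    · -- duplicate lang: setdefault is a no-op, and the extra probe can never fire
      rw [PySem.Dict.setdefault_of_contains _ _ hc, ih]
      rcases hS : pvScan names ls with _ | v
      · have hmem : lang ∈ ls := by
          have := pvRankAux_contains ls PySem.Dict.empty 0 lang
          rw [hc] at this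
          simp [PySem.Dict.contains_empty] at this
          exact this
        rw [pvScan_none names ls hS lang hmem]
        rfl
      · rfl
    · rw [PySem.Dict.setdefault_of_not_contains _ _ (by simpa using hc)]
      have hvals : ∀ l v, (pvRankAux PySem.Dict.empty 0 ls).get? l = some v →
          v < (0 : Int) + ls.length :=
        pvRankAux_val_lt ls PySem.Dict.empty 0
          (by intro l v h; rw [PySem.Dict.get?_empty] at h; cases h)
      rw [pvBest_insert _ lang _ (by intro l v h; simpa using hvals l v h)
        (by simpa using hc) names]
      rcases hB : pvBest (pvRankAux PySem.Dict.empty 0 ls) names with _ | b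
      · rw [hB] at ih; rw [← ih]
        cases pvLastMatch names lang <;> simp
      · rw [hB] at ih; rw [← ih]
        simp

-- ===== VERDICT (by name: the statement is the Claim_ definition above) =====
theorem get_localized_name_spec : Claim_equal_get_localized_name := by
  intro names_data preferred_langs _ _
  unfold Spec_get_localized_name get_localized_name get_localized_name_alt
  cases names_data with
  | nil => rfl
  | cons first rest =>
    rw [pvProbe_eq_scan, ← pvBest_eq_scan]
    rcases pvBest (pvRankAux PySem.Dict.empty 0 preferred_langs) (first :: rest) with _ | ⟨r, nm⟩
    · rfl
    · rfl
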